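-- pv_equiv track=rewrite | github.com/Samuelfdezurrea/procesamiento-imagenes-umng | modulos/segmentacion.py | morfologia
-- ===== SOURCE A (Python) =====
-- from typing import List
--
-- def morfologia(matriz: List[List[int]], ancho: int, alto: int, operacion: str = "erosion") -> List[List[int]]:
--     """
--     Morfología binaria: erosión, dilatación, apertura, cierre.
--     Usamos un elemento estructurante 3x3.
--     """
--     def erosion(m):
--         out = [[0]*ancho for _ in range(alto)]
--         for i in range(1, alto-1):
--             for j in range(1, ancho-1):
--                 vecinos = [m[i+di][j+dj] for di in (-1,0,1) for dj in (-1,0,1)]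
--                 out[i][j] = 255 if all(v==255 for v in vecinos) else 0
--         return out
--
--     def dilatacion(m):
--         out = [[0]*ancho for _ in range(alto)]
--         for i in range(1, alto-1):
--             for j in range(1, ancho-1):
--                 vecinos = [m[i+di][j+dj] for di in (-1,0,1) for dj in (-1,0,1)]
--                 out[i][j] = 255 if any(v==255 for v in vecinos) else 0
--         return out
--
--     if operacion == "erosion":
--         return erosion(matriz)
--     elif operacion == "dilatacion":
--         return dilatacion(matriz)
--     elif operacion == "apertura":
--         return dilatacion(erosion(matriz))
--     elif operacion == "cierre":
--         return erosion(dilatacion(matriz))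
--     else:
--         raise ValueError("Operación no válida: elija erosion, dilatacion, apertura o cierre")
-- ===== SOURCE B (Python) =====
-- def morfologia(matriz, ancho, alto, operacion="erosion"):
--     """Separable two-pass 3x3 morphology: horizontal pass then vertical pass (3+3
--     reads per cell instead of 9); borders forced to 0, same dispatch as before."""
--     def separable(m, comb):
--         if alto < 3 or ancho < 3:
--             return [[0] * ancho for _ in range(alto)]
--         temp = [[comb(m[i][j - 1], m[i][j], m[i][j + 1]) if 1 <= j <= ancho - 2 else 0
--                  for j in range(ancho)] for i in range(alto)]
--         return [[comb(temp[i - 1][j], temp[i][j], temp[i + 1][j])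
--                  if 1 <= i <= alto - 2 and 1 <= j <= ancho - 2 else 0
--                  for j in range(ancho)] for i in range(alto)]
--
--     def comb_e(a, b, c):
--         return 255 if a == 255 and b == 255 and c == 255 else 0
--
--     def comb_d(a, b, c):
--         return 255 if a == 255 or b == 255 or c == 255 else 0
--
--     if operacion == "erosion":
--         return separable(matriz, comb_e)
--     elif operacion == "dilatacion":
--         return separable(matriz, comb_d)
--     elif operacion == "apertura":
--         return separable(separable(matriz, comb_e), comb_d)
--     elif operacion == "cierre":
--         return separable(separable(matriz, comb_d), comb_e)
--     else:
--         raise ValueError("Operación no válida: elija erosion, dilatacion, apertura o cierre")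
-- ===== Notes on version B (the rewrite author's own statement) =====
-- stated objective: faster
-- what changed: Replaces the 9-neighbour gather per interior cell by a separable two-pass filter (a horizontal 3-tap pass into a temp matrix, then a vertical 3-tap pass), cutting the reads per cell from 9 to 3+3.
import Mathlib
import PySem

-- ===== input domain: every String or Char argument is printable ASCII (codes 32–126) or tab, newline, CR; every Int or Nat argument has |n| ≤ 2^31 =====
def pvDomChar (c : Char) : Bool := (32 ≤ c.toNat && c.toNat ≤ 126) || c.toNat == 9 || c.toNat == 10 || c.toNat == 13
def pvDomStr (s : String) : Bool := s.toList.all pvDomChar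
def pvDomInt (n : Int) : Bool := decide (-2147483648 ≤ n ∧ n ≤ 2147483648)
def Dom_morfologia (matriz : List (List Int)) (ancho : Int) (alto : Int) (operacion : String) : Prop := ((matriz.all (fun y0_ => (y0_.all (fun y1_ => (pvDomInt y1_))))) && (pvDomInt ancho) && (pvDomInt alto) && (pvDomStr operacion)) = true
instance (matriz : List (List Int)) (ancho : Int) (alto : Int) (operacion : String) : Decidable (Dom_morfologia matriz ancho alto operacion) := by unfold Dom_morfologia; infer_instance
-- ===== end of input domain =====

-- B replaces A's 9-neighbour gather by a separable horizontal+vertical two-pass filter (faster by a constant factor).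

-- m[i][j] at nonnegative in-range indices (Pre_ guarantees all reads are in range)
def pvGet2 (m : List (List Int)) (i j : Int) : Int :=
  PySem.List.pyGetD (PySem.List.pyGetD m i []) j 0

-- ===== PORT A =====
def pvErosA (m : List (List Int)) (ancho alto : Int) : List (List Int) :=
  (PySem.List.pyRange 0 alto 1).map (fun i =>
    (PySem.List.pyRange 0 ancho 1).map (fun j =>
      if 1 ≤ i ∧ i ≤ alto - 2 ∧ 1 ≤ j ∧ j ≤ ancho - 2 then
        if ([pvGet2 m (i-1) (j-1), pvGet2 m (i-1) j, pvGet2 m (i-1) (j+1),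
             pvGet2 m i (j-1), pvGet2 m i j, pvGet2 m i (j+1),
             pvGet2 m (i+1) (j-1), pvGet2 m (i+1) j, pvGet2 m (i+1) (j+1)].all (· == 255))
        then 255 else 0
      else 0))

def pvDilA (m : List (List Int)) (ancho alto : Int) : List (List Int) :=
  (PySem.List.pyRange 0 alto 1).map (fun i =>
    (PySem.List.pyRange 0 ancho 1).map (fun j =>
      if 1 ≤ i ∧ i ≤ alto - 2 ∧ 1 ≤ j ∧ j ≤ ancho - 2 then
        if ([pvGet2 m (i-1) (j-1), pvGet2 m (i-1) j, pvGet2 m (i-1) (j+1),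
             pvGet2 m i (j-1), pvGet2 m i j, pvGet2 m i (j+1),
             pvGet2 m (i+1) (j-1), pvGet2 m (i+1) j, pvGet2 m (i+1) (j+1)].any (· == 255))
        then 255 else 0
      else 0))

def morfologia (matriz : List (List Int)) (ancho : Int) (alto : Int) (operacion : String) : List (List Int) :=
  if operacion = "erosion" then pvErosA matriz ancho alto
  else if operacion = "dilatacion" then pvDilA matriz ancho alto
  else if operacion = "apertura" then pvDilA (pvErosA matriz ancho alto) ancho alto
  else if operacion = "cierre" then pvErosA (pvDilA matriz ancho alto) ancho alto
  else []  -- Python raises ValueError here; excluded by Pre_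

-- ===== PORT B =====
def pvCombE (a b c : Int) : Int := if a = 255 ∧ b = 255 ∧ c = 255 then 255 else 0
def pvCombD (a b c : Int) : Int := if a = 255 ∨ b = 255 ∨ c = 255 then 255 else 0

def pvSeparable (comb : Int → Int → Int → Int) (m : List (List Int)) (ancho alto : Int) : List (List Int) :=
  if alto < 3 ∨ ancho < 3 then
    (PySem.List.pyRange 0 alto 1).map (fun _ => (PySem.List.pyRange 0 ancho 1).map (fun _ => (0 : Int)))
  else
    let temp := (PySem.List.pyRange 0 alto 1).map (fun i =>
      (PySem.List.pyRange 0 ancho 1).map (fun j =>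
        if 1 ≤ j ∧ j ≤ ancho - 2 then comb (pvGet2 m i (j-1)) (pvGet2 m i j) (pvGet2 m i (j+1)) else 0))
    (PySem.List.pyRange 0 alto 1).map (fun i =>
      (PySem.List.pyRange 0 ancho 1).map (fun j =>
        if 1 ≤ i ∧ i ≤ alto - 2 ∧ 1 ≤ j ∧ j ≤ ancho - 2 then
          comb (pvGet2 temp (i-1) j) (pvGet2 temp i j) (pvGet2 temp (i+1) j)
        else 0))

def morfologia_alt (matriz : List (List Int)) (ancho : Int) (alto : Int) (operacion : String) : List (List Int) :=
  if operacion = "erosion" then pvSeparable pvCombE matriz ancho alto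
  else if operacion = "dilatacion" then pvSeparable pvCombD matriz ancho alto
  else if operacion = "apertura" then pvSeparable pvCombD (pvSeparable pvCombE matriz ancho alto) ancho alto
  else if operacion = "cierre" then pvSeparable pvCombE (pvSeparable pvCombD matriz ancho alto) ancho alto
  else []  -- Python raises ValueError here; excluded by Pre_

-- ===== PRECONDITION & SPEC =====
-- Pre_ excludes exactly the inputs on which Python A raises: an unknown operation
-- (ValueError) and, when the 3x3 interior is nonempty, a matriz with fewer than alto
-- rows or a row among the first alto with fewer than ancho entries (IndexError).
def Pre_morfologia (matriz : List (List Int)) (ancho : Int) (alto : Int) (operacion : String) : Prop :=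
  (operacion = "erosion" ∨ operacion = "dilatacion" ∨ operacion = "apertura" ∨ operacion = "cierre") ∧
  (3 ≤ alto ∧ 3 ≤ ancho →
    alto ≤ (matriz.length : Int) ∧ ∀ r ∈ matriz.take alto.toNat, ancho ≤ (r.length : Int))
instance (matriz : List (List Int)) (ancho : Int) (alto : Int) (operacion : String) : Decidable (Pre_morfologia matriz ancho alto operacion) := by unfold Pre_morfologia; infer_instance

def pvWitness_morfologia : List (List Int) × Int × Int × String :=
  ([[0, 255, 0], [255, 255, 255], [0, 255, 0]], 3, 3, "apertura")

def Spec_morfologia (matriz : List (List Int)) (ancho : Int) (alto : Int) (operacion : String) (out : List (List Int)) : Prop := out = morfologia_alt matriz ancho alto operacion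
instance (matriz : List (List Int)) (ancho : Int) (alto : Int) (operacion : String) (out : List (List Int)) : Decidable (Spec_morfologia matriz ancho alto operacion out) := by unfold Spec_morfologia; infer_instance

-- ===== CLAIM (what is proved, stated in full; the proofs are below) =====
def Claim_equal_morfologia : Prop := ∀ (matriz : List (List Int)) (ancho : Int) (alto : Int) (operacion : String), Dom_morfologia matriz ancho alto operacion → Pre_morfologia matriz ancho alto operacion → Spec_morfologia matriz ancho alto operacion (morfologia matriz ancho alto operacion)

-- ===== LEMMAS AND PROOFS =====

lemma pvCombE_comp (a b c d e f g h k : Int) :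
    pvCombE (pvCombE a b c) (pvCombE d e f) (pvCombE g h k) =
      (if ([a, b, c, d, e, f, g, h, k].all (· == 255)) then (255 : Int) else 0) := by
  simp only [pvCombE, List.all_cons, List.all_nil, Bool.and_true, beq_iff_eq,
    Bool.and_eq_true]
  split_ifs <;> simp_all

lemma pvCombD_comp (a b c d e f g h k : Int) :
    pvCombD (pvCombD a b c) (pvCombD d e f) (pvCombD g h k) =
      (if ([a, b, c, d, e, f, g, h, k].any (· == 255)) then (255 : Int) else 0) := by
  simp only [pvCombD, List.any_cons, List.any_nil, Bool.or_false, beq_iff_eq,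
    Bool.or_eq_true]
  split_ifs <;> simp_all

-- reading an entry of a matrix built as a nested map over ranges
lemma pvGet2_build (f : Int → Int → Int) (ancho alto i j : Int)
    (hi0 : 0 ≤ i) (hi : i < alto) (hj0 : 0 ≤ j) (hj : j < ancho) :
    pvGet2 ((PySem.List.pyRange 0 alto 1).map (fun i =>
      (PySem.List.pyRange 0 ancho 1).map (fun j => f i j))) i j = f i j := by
  unfold pvGet2
  rw [PySem.List.pyGetD_map_pyRange_of_nonneg _ alto i [] hi0 hi,
    PySem.List.pyGetD_map_pyRange_of_nonneg _ ancho j 0 hj0 hj]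

-- A's single pass equals B's separable two passes, for either comb
lemma pvSeparable_eq (comb : Int → Int → Int → Int) (agg : List Int → Bool)
    (hcomb : ∀ a b c d e f g h k : Int,
      comb (comb a b c) (comb d e f) (comb g h k) =
        (if (agg [a, b, c, d, e, f, g, h, k]) then (255 : Int) else 0))
    (m : List (List Int)) (ancho alto : Int) :
    pvSeparable comb m ancho alto =
      (PySem.List.pyRange 0 alto 1).map (fun i =>
        (PySem.List.pyRange 0 ancho 1).map (fun j =>
          if 1 ≤ i ∧ i ≤ alto - 2 ∧ 1 ≤ j ∧ j ≤ ancho - 2 then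
            if (agg [pvGet2 m (i-1) (j-1), pvGet2 m (i-1) j, pvGet2 m (i-1) (j+1),
                 pvGet2 m i (j-1), pvGet2 m i j, pvGet2 m i (j+1),
                 pvGet2 m (i+1) (j-1), pvGet2 m (i+1) j, pvGet2 m (i+1) (j+1)])
            then 255 else 0
          else 0)) := by
  unfold pvSeparable
  split_ifs with hsmall
  · -- interior empty: every A-side entry is 0
    refine (List.map_congr_left ?_).symm
    intro i _
    refine List.map_congr_left ?_
    intro j _
    rw [if_neg]
    rintro ⟨h1, h2, h3, h4⟩
    omega
  · push Not at hsmall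
    refine List.map_congr_left ?_
    intro i hi
    rw [PySem.List.mem_pyRange_one] at hi
    refine List.map_congr_left ?_
    intro j hj
    rw [PySem.List.mem_pyRange_one] at hj
    by_cases hint : 1 ≤ i ∧ i ≤ alto - 2 ∧ 1 ≤ j ∧ j ≤ ancho - 2
    · rw [if_pos hint, if_pos hint]
      obtain ⟨hi1, hi2, hj1, hj2⟩ := hint
      rw [pvGet2_build _ ancho alto (i-1) j (by omega) (by omega) (by omega) (by omega),
        pvGet2_build _ ancho alto i j (by omega) (by omega) (by omega) (by omega),
        pvGet2_build _ ancho alto (i+1) j (by omega) (by omega) (by omega) (by omega)]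
      rw [if_pos (by omega : 1 ≤ j ∧ j ≤ ancho - 2),
        if_pos (by omega : 1 ≤ j ∧ j ≤ ancho - 2),
        if_pos (by omega : 1 ≤ j ∧ j ≤ ancho - 2)]
      exact hcomb _ _ _ _ _ _ _ _ _
    · rw [if_neg hint, if_neg hint]

lemma pvErosA_eq (m : List (List Int)) (ancho alto : Int) :
    pvSeparable pvCombE m ancho alto = pvErosA m ancho alto := by
  rw [pvSeparable_eq pvCombE (List.all · (· == 255)) pvCombE_comp m ancho alto]; rfl

lemma pvDilA_eq (m : List (List Int)) (ancho alto : Int) :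
    pvSeparable pvCombD m ancho alto = pvDilA m ancho alto := by
  rw [pvSeparable_eq pvCombD (List.any · (· == 255)) pvCombD_comp m ancho alto]; rfl

-- ===== VERDICT (by name: the statement is the Claim_ definition above) =====
theorem morfologia_spec : Claim_equal_morfologia := by
  intro matriz ancho alto operacion _ _
  unfold Spec_morfologia morfologia morfologia_alt
  split_ifs <;> simp [pvErosA_eq, pvDilA_eq]
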